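-- pv_equiv track=rewrite | github.com/dig-team/FLORA | main.py | filter_unique_patterns
-- ===== SOURCE A (Python) =====
-- from itertools import combinations
--
-- def filter_unique_patterns(list1, list2):
--     '''
--     Select list1 based on list2 pattern
--     example: list1 = ['a', 'b', 'c']
--              list2 = ['A', 'B', 'A']
--              return: [(['a', 'b'], ['A', 'B']), (['b', 'c'], ['B', 'A'])]
--     '''
--     unique_patterns = set(list2)
--     pattern_len = len(unique_patterns)
--     results = []
--     for indices in combinations(range(len(list2)), pattern_len):
--         selected_elm2 = [list2[i] for i in indices]
--         if len(set(selected_elm2)) == pattern_len: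
--             selected_elm1 = [list1[i] for i in indices]
--             results.append((selected_elm1, selected_elm2))
--     return results
-- ===== SOURCE B (Python) =====
-- def filter_unique_patterns(list1, list2):
--     '''
--     Select list1 based on list2 pattern: backtracking over candidate indices,
--     pruning branches that repeat a pattern value and bounding each loop to
--     candidates that still leave enough indices to complete the pattern,
--     instead of generating and filtering all C(n, k) combinations.
--     '''
--     k = len(set(list2))
--
--     def go(rest, idxs, vals):
--         if len(idxs) == k:
--             return [([list1[i] for i in idxs], [list2[i] for i in idxs])]
--         out = []
--         for p, i in enumerate(rest[:max(0, len(rest) + 1 - (k - len(idxs)))]):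
--             if list2[i] not in vals:
--                 out += go(rest[p + 1:], idxs + [i], vals | {list2[i]})
--         return out
--
--     return go(range(len(list2)), [], set())
-- ===== Notes on version B (the rewrite author's own statement) =====
-- stated objective: alternative
-- what changed: A generates all C(n,k) index combinations and filters those whose pattern values are all distinct; B does a backtracking search that extends an index prefix only with indices whose pattern value is new (and only while enough indices remain to complete the pattern), producing the same results in the same lexicographic order without enumerating C(n,k) tuples.
import Mathlib
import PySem

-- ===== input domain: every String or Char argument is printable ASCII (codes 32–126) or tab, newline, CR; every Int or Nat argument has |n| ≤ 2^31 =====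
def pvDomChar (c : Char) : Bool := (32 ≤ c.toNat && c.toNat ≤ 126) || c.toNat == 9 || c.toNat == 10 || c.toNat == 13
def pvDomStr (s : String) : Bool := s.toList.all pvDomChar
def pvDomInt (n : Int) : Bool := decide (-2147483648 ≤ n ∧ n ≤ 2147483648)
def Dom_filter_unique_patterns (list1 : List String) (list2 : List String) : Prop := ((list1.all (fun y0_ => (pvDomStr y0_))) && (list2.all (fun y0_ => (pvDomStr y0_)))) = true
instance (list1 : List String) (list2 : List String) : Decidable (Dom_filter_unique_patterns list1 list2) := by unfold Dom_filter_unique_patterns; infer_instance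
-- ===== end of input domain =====

-- B replaces A's generate-all-C(n,k)-combinations-then-filter with a backtracking
-- search over indices that prunes branches repeating a pattern value (objective:
-- alternative algorithm, same results in the same order). Python tuple results are
-- encoded as two-element lists, per the task's fixed return type.

-- ===== PORT A =====
-- itertools.combinations(l, k) in lexicographic order (library call, ported as the
-- standard recursion producing exactly its sequence of k-subsequences).
def pyCombs : Nat → List Nat → List (List Nat)
  | 0, _ => [[]]
  | _ + 1, [] => []
  | k + 1, x :: xs => (pyCombs k xs).map (fun c => x :: c) ++ pyCombs (k + 1) xs

-- Indices produced by pyCombs over List.range n are all < n, so list2.getD i "" is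
-- exactly list2[i]; for list1, Pre_ (len(list2) ≤ len(list1)) makes getD exact too.
def filter_unique_patterns (list1 : List String) (list2 : List String) : List (List (List String)) :=
  let pattern_len := (PySem.Set.ofList list2).length
  (pyCombs pattern_len (List.range list2.length)).foldl
    (fun results indices =>
      let selected_elm2 := indices.map (fun i => list2.getD i "")
      if (PySem.Set.ofList selected_elm2).length = pattern_len then
        results ++ [[indices.map (fun i => list1.getD i ""), selected_elm2]]
      else results) []

-- ===== PORT B =====
-- go(rest, idxs, vals) of Source B: altGo is the function body, altLoop its for-loop over
-- the bounded prefix rest[:max(0, len(rest) + 1 - (k - len(idxs)))] (cnt = that bound;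
-- Nat subtraction computes exactly the max(0, ...) since k - len(idxs) >= 1 in that
-- branch); each loop iteration visits rest's head together with the suffix rest[p+1:].
mutual
def altGo (l1 l2 : List String) (k : Nat) (rest idxs : List Nat) (vals : PySem.Set String) : List (List (List String)) :=
  if idxs.length = k then
    [[idxs.map (fun i => l1[i]?.getD ""), idxs.map (fun i => l2[i]?.getD "")]]
  else altLoop l1 l2 k (rest.length + 1 - (k - idxs.length)) rest idxs vals
  termination_by 2 * rest.length + 1
def altLoop (l1 l2 : List String) (k : Nat) (cnt : Nat) (rest idxs : List Nat) (vals : PySem.Set String) : List (List (List String)) :=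
  match cnt, rest with
  | 0, _ => []
  | _ + 1, [] => []
  | cnt' + 1, i :: rs =>
    (if PySem.Set.contains vals (l2[i]?.getD "") then []
     else altGo l1 l2 k rs (idxs ++ [i]) (PySem.Set.add vals (l2[i]?.getD ""))) ++
    altLoop l1 l2 k cnt' rs idxs vals
  termination_by 2 * rest.length
end

def filter_unique_patterns_alt (list1 : List String) (list2 : List String) : List (List (List String)) :=
  altGo list1 list2 (PySem.Set.ofList list2).length (List.range list2.length) [] PySem.Set.empty

-- ===== PRECONDITION & SPEC =====
-- Pre_ excludes exactly the inputs where A raises IndexError: whenever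
-- len(list2) > len(list1) some all-distinct index combination reaches an index ≥ len(list1).
def Pre_filter_unique_patterns (list1 : List String) (list2 : List String) : Prop :=
  list2.length ≤ list1.length
instance (list1 : List String) (list2 : List String) : Decidable (Pre_filter_unique_patterns list1 list2) := by unfold Pre_filter_unique_patterns; infer_instance

def pvWitness_filter_unique_patterns : List String × List String := (["a", "b", "c"], ["A", "B", "A"])

def Spec_filter_unique_patterns (list1 : List String) (list2 : List String) (out : List (List (List String))) : Prop := out = filter_unique_patterns_alt list1 list2
instance (list1 : List String) (list2 : List String) (out : List (List (List String))) : Decidable (Spec_filter_unique_patterns list1 list2 out) := by unfold Spec_filter_unique_patterns; infer_instance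

-- ===== CLAIM (what is proved, stated in full; the proofs are below) =====
def Claim_equal_filter_unique_patterns : Prop := ∀ (list1 : List String) (list2 : List String), Dom_filter_unique_patterns list1 list2 → Pre_filter_unique_patterns list1 list2 → Spec_filter_unique_patterns list1 list2 (filter_unique_patterns list1 list2)

-- ===== LEMMAS AND PROOFS =====

theorem length_of_mem_pyCombs : ∀ (m : Nat) (l : List Nat) (c : List Nat), c ∈ pyCombs m l → c.length = m := by
  intro m
  induction m with
  | zero => intro l c hc; simp [pyCombs] at hc; simp [hc]
  | succ m ih =>
    intro l
    induction l with
    | nil => intro c hc; simp [pyCombs] at hc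
    | cons x xs ihl =>
      intro c hc
      simp only [pyCombs, List.mem_append, List.mem_map] at hc
      rcases hc with ⟨d, hd, rfl⟩ | hc
      · simp [ih xs d hd]
      · exact ihl c hc

theorem length_update_le (s : PySem.Set String) (l : List String) :
    (PySem.Set.update s l).length ≤ s.length + l.length := by
  induction l generalizing s with
  | nil => simp [PySem.Set.update]
  | cons x xs ih =>
    have h1 : (PySem.Set.add s x).length ≤ s.length + 1 := by
      by_cases h : x ∈ s <;> simp [PySem.Set.add, h]
    calc (PySem.Set.update s (x :: xs)).length
        = (PySem.Set.update (PySem.Set.add s x) xs).length := by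
          simp [PySem.Set.update_cons]
      _ ≤ (PySem.Set.add s x).length + xs.length := ih _
      _ ≤ s.length + (x :: xs).length := by simp; omega

theorem foldl_if_prop {α β : Type} (P : α → Prop) [DecidablePred P] (f : α → β) :
    ∀ (l : List α) (acc : List β),
      l.foldl (fun r c => if P c then r ++ [f c] else r) acc =
        acc ++ (l.filter (fun c => decide (P c))).map f := by
  intro l
  induction l with
  | nil => simp
  | cons x xs ih =>
    intro acc
    by_cases h : P x <;> simp [h, ih]

theorem pyCombs_nil : ∀ (l : List Nat) (m : Nat), l.length < m → pyCombs m l = [] := by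
  intro l
  induction l with
  | nil =>
    intro m hm
    obtain ⟨m', rfl⟩ : ∃ m', m = m' + 1 := ⟨m - 1, by omega⟩
    rfl
  | cons x xs ih =>
    intro m hm
    obtain ⟨m', rfl⟩ : ∃ m', m = m' + 1 := ⟨m - 1, by omega⟩
    simp only [List.length_cons] at hm
    rw [pyCombs, ih m' (by omega), ih (m' + 1) (by omega)]
    simp

theorem altGo_eq_filter (l1 l2 : List String) (k : Nat) :
    ∀ (rest idxs : List Nat),
      idxs.length ≤ k →
      (PySem.Set.ofList (idxs.map (fun i => l2[i]?.getD ""))).length = idxs.length →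
      altGo l1 l2 k rest idxs (PySem.Set.ofList (idxs.map (fun i => l2[i]?.getD ""))) =
        ((pyCombs (k - idxs.length) rest).filter
          (fun c => decide ((PySem.Set.ofList ((idxs ++ c).map (fun i => l2[i]?.getD ""))).length = k))).map
          (fun c => [(idxs ++ c).map (fun i => l1[i]?.getD ""), (idxs ++ c).map (fun i => l2[i]?.getD "")]) := by
  intro rest
  induction rest with
  | nil =>
    intro idxs hlen hvals
    by_cases hk : idxs.length = k
    · rw [altGo]
      simp [hk, pyCombs, hvals]
    · obtain ⟨m, hm⟩ : ∃ m, k - idxs.length = m + 1 := ⟨k - idxs.length - 1, by omega⟩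
      rw [altGo, hm]
      rw [if_neg hk]
      have h0 : (List.length ([] : List Nat)) + 1 - (m + 1) = 0 := by simp
      rw [h0, altLoop]
      simp [pyCombs]
  | cons i rs ih =>
    intro idxs hlen hvals
    by_cases hk : idxs.length = k
    · rw [altGo]
      simp [hk, pyCombs, hvals]
    · obtain ⟨m, hm⟩ : ∃ m, k - idxs.length = m + 1 := ⟨k - idxs.length - 1, by omega⟩
      rw [altGo, hm]
      rw [if_neg hk]
      by_cases hcnt : (i :: rs).length + 1 - (m + 1) = 0
      · rw [hcnt, altLoop]
        rw [pyCombs_nil (i :: rs) (m + 1) (by simp at hcnt ⊢; omega)]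
        simp
      · obtain ⟨c', hc'⟩ : ∃ c', (i :: rs).length + 1 - (m + 1) = c' + 1 :=
          ⟨(i :: rs).length + 1 - (m + 1) - 1, by omega⟩
        rw [hc', altLoop]
        rw [pyCombs]
        rw [List.filter_append, List.map_append, List.filter_map, List.map_map]
        congr 1
        · by_cases hmem : l2[i]?.getD "" ∈ PySem.Set.ofList (idxs.map (fun j => l2[j]?.getD ""))
          · have hcont : (PySem.Set.ofList (idxs.map (fun j => l2[j]?.getD ""))).contains (l2[i]?.getD "") = true := by
              simp [PySem.Set.contains, hmem]
            rw [if_pos hcont]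
            symm
            rw [List.map_eq_nil_iff, List.filter_eq_nil_iff]
            intro c hc
            simp only [Function.comp_apply, decide_eq_true_eq]
            intro habs
            have hclen : c.length = m := length_of_mem_pyCombs m rs c hc
            have hsplit : (idxs ++ i :: c).map (fun j => l2[j]?.getD "") =
                (idxs.map (fun j => l2[j]?.getD "") ++ [l2[i]?.getD ""]) ++ c.map (fun j => l2[j]?.getD "") := by
              simp
            rw [hsplit, PySem.Set.ofList_append, PySem.Set.ofList_append_singleton] at habs
            have hadd : (PySem.Set.ofList (idxs.map (fun j => l2[j]?.getD ""))).add (l2[i]?.getD "") =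
                PySem.Set.ofList (idxs.map (fun j => l2[j]?.getD "")) := by
              unfold PySem.Set.add
              rw [hcont]
              simp
            rw [hadd] at habs
            have hle := length_update_le (PySem.Set.ofList (idxs.map (fun j => l2[j]?.getD "")))
              (c.map (fun j => l2[j]?.getD ""))
            rw [habs] at hle
            simp [hvals, hclen] at hle
            omega
          · have hmem' : ∀ x ∈ idxs, ¬ l2[x]?.getD "" = l2[i]?.getD "" := by
              simpa [PySem.Set.mem_ofList] using hmem
            have hcont : (PySem.Set.ofList (idxs.map (fun j => l2[j]?.getD ""))).contains (l2[i]?.getD "") = false := by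
              simp [PySem.Set.contains]
              exact hmem'
            rw [if_neg (by rw [hcont]; exact Bool.false_ne_true)]
            have hset : (PySem.Set.ofList (idxs.map (fun j => l2[j]?.getD ""))).add (l2[i]?.getD "") =
                PySem.Set.ofList ((idxs ++ [i]).map (fun j => l2[j]?.getD "")) := by
              simp [PySem.Set.ofList_append_singleton]
            have hvals' : (PySem.Set.ofList ((idxs ++ [i]).map (fun j => l2[j]?.getD ""))).length =
                (idxs ++ [i]).length := by
              simp only [List.map_append, List.map_cons, List.map_nil]
              rw [PySem.Set.ofList_append_singleton]
              unfold PySem.Set.add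
              rw [hcont]
              simp [hvals]
            rw [hset, ih (idxs ++ [i]) (by simp; omega) hvals']
            have hm' : k - (idxs ++ [i]).length = m := by simp; omega
            rw [hm']
            simp only [← List.append_cons, Function.comp_def]
        · have hc'' : c' = rs.length + 1 - (m + 1) := by simp at hc'; omega
          have hloop : altLoop l1 l2 k c' rs idxs (PySem.Set.ofList (idxs.map (fun i => l2[i]?.getD ""))) =
              altGo l1 l2 k rs idxs (PySem.Set.ofList (idxs.map (fun i => l2[i]?.getD ""))) := by
            rw [altGo]
            rw [if_neg hk, hm, ← hc'']
          rw [hloop, ih idxs hlen hvals, hm]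

-- ===== VERDICT (by name: the statement is the Claim_ definition above) =====
theorem filter_unique_patterns_spec : Claim_equal_filter_unique_patterns := by
  intro list1 list2 _ _
  unfold Spec_filter_unique_patterns filter_unique_patterns filter_unique_patterns_alt
  show (pyCombs (PySem.Set.ofList list2).length (List.range list2.length)).foldl
      (fun results indices =>
        if (PySem.Set.ofList (indices.map (fun i => list2.getD i ""))).length = (PySem.Set.ofList list2).length then
          results ++ [[indices.map (fun i => list1.getD i ""), indices.map (fun i => list2.getD i "")]]
        else results) [] = _
  rw [foldl_if_prop]
  have h := altGo_eq_filter list1 list2 (PySem.Set.ofList list2).length (List.range list2.length) []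
    (by simp) (by simp [PySem.Set.ofList])
  simp only [List.nil_append, List.length_nil, Nat.sub_zero, List.map_nil] at h
  rw [List.nil_append]
  exact h.symm
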